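-- pv_equiv track=rewrite | github.com/fenugrec/hp1660_utils | romdumper_helper/batchcapture.py | unshift_rawdata
-- ===== SOURCE A (Python) =====
-- def unshift_rawdata(src, mask):
--     out = 0
--     ob = 0
--     while mask:
--         if mask & 1:
--             if src & 1:
--                 out |= 1 << ob
--             ob += 1
--         mask >>= 1
--         src >>= 1
--     return out
-- ===== SOURCE B (Python) =====
-- def unshift_rawdata(src, mask):
--     # Recursive, accumulator-free: recurse on the tails, then build the
--     # result back-to-front by shifting the recursive result left.
--     if mask == 0:
--         return 0
--     rest = unshift_rawdata(src >> 1, mask >> 1)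
--     if mask & 1:
--         return (rest << 1) | (src & 1)
--     return rest
-- ===== Notes on version B (the rewrite author's own statement) =====
-- stated objective: simpler
-- what changed: B replaces A's while loop with its out/ob accumulators by an accumulator-free recursion on the shifted arguments that builds the result back-to-front via (rest << 1) | (src & 1).
import Mathlib
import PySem

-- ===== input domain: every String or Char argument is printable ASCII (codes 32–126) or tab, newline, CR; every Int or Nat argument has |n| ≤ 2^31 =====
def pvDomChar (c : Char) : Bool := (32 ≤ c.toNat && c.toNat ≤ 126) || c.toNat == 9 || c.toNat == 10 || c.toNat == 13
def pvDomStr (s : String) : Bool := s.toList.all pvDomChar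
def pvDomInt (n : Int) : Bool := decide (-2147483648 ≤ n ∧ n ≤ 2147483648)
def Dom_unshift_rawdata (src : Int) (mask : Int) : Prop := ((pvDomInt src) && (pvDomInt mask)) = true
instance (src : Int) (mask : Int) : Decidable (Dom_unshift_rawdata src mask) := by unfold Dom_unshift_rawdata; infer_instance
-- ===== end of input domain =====

-- B replaces A's accumulator loop (out/ob counters, bit-by-bit shifting) by an
-- accumulator-free recursion that builds the result back-to-front: simpler decomposition, same values.


-- termination helper for both ports: halving a positive int shrinks toNat
theorem pvShiftToNatLt (mask : Int) (h : ¬ mask ≤ 0) : (mask >>> (1:Nat)).toNat < mask.toNat := by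
  obtain ⟨m, rfl⟩ : ∃ m : Nat, mask = ((m + 1 : Nat) : Int) :=
    ⟨mask.toNat - 1, by omega⟩
  rw [← Int.natCast_shiftRight]
  simp [Nat.shiftRight_one]
  omega

-- ===== PORT A =====
-- literal port of A's while loop: test mask&1, test src&1, or 1<<ob into out, shift mask and src.
-- (the 'mask ≤ 0 then out' guard is a totality device: Python's loop never terminates for mask < 0,
--  and Pre_ excludes those inputs; for mask = 0 it is exactly Python's loop exit)
def pvLoopA (src : Int) (mask : Int) (out : Int) (ob : Nat) : Int :=
  if h : mask ≤ 0 then out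
  else
    if PySem.Int.band mask 1 ≠ 0 then
      pvLoopA (src >>> (1:Nat)) (mask >>> (1:Nat))
        (if PySem.Int.band src 1 ≠ 0 then PySem.Int.bor out (1 <<< ob) else out) (ob + 1)
    else
      pvLoopA (src >>> (1:Nat)) (mask >>> (1:Nat)) out ob
  termination_by mask.toNat
  decreasing_by all_goals exact pvShiftToNatLt mask h

def unshift_rawdata (src : Int) (mask : Int) : Int := pvLoopA src mask 0 0

-- ===== PORT B =====
-- literal port of Source B: recurse on src>>1, mask>>1 first, then build the result back-to-front
-- as (rest << 1) | (src & 1) when mask is odd.  Same totality guard as port A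
-- (Python's 'if mask == 0: return 0'; mask < 0, where Python B recurses forever, is outside Pre_).
def unshift_rawdata_alt (src : Int) (mask : Int) : Int :=
  if h : mask ≤ 0 then 0
  else
    let rest := unshift_rawdata_alt (src >>> (1:Nat)) (mask >>> (1:Nat))
    if PySem.Int.band mask 1 ≠ 0 then PySem.Int.bor (rest <<< (1:Nat)) (PySem.Int.band src 1)
    else rest
  termination_by mask.toNat
  decreasing_by exact pvShiftToNatLt mask h

-- ===== PRECONDITION & SPEC =====
-- Pre_ excludes mask < 0, on which Python A's loop never terminates (and B recurses forever).
def Pre_unshift_rawdata (src : Int) (mask : Int) : Prop := 0 ≤ mask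
instance (src : Int) (mask : Int) : Decidable (Pre_unshift_rawdata src mask) := by
  unfold Pre_unshift_rawdata; infer_instance

def pvWitness_unshift_rawdata : Int × Int := (5, 6)

def Spec_unshift_rawdata (src : Int) (mask : Int) (out : Int) : Prop := out = unshift_rawdata_alt src mask
instance (src : Int) (mask : Int) (out : Int) : Decidable (Spec_unshift_rawdata src mask out) := by unfold Spec_unshift_rawdata; infer_instance

-- ===== CLAIM (what is proved, stated in full; the proofs are below) =====
def Claim_equal_unshift_rawdata : Prop := ∀ (src : Int) (mask : Int), Dom_unshift_rawdata src mask → Pre_unshift_rawdata src mask → Spec_unshift_rawdata src mask (unshift_rawdata src mask)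

-- ===== LEMMAS AND PROOFS =====

-- src & 1 is 0 or 1 for every integer src
theorem pvBandOne01 (src : Int) : PySem.Int.band src 1 = 0 ∨ PySem.Int.band src 1 = 1 := by
  cases src with
  | ofNat s =>
      rw [show (Int.ofNat s) = ((s : Nat) : Int) from rfl,
        show ((1:Int) = ((1:Nat) : Int)) from rfl, PySem.Int.band_natCast]
      have := Nat.and_one_is_mod s
      omega
  | negSucc s =>
      have ha : ¬ (0:Int) ≤ Int.negSucc s := by omega
      have hs : -(Int.negSucc s) - 1 = (s : Int) := by rw [Int.negSucc_eq]; ring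
      simp only [PySem.Int.band, if_neg ha, if_pos (by norm_num : (0:Int) ≤ 1), hs]
      have h1 : (1:Int).toNat = 1 := rfl
      rw [h1, Int.toNat_natCast]
      have := Nat.and_one_is_mod s
      rw [Nat.land_comm]
      omega

-- Nat-valued mirror of B's recursion, used only by the proofs
def pvG (src : Int) (m : Nat) : Nat :=
  if m = 0 then 0
  else
    let rest := pvG (src >>> (1:Nat)) (m / 2)
    if m % 2 = 1 then (rest <<< 1) ||| (PySem.Int.band src 1).toNat else rest
  termination_by m
  decreasing_by exact Nat.div_lt_self (by omega) (by norm_num)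

-- shift of a nonnegative cast
theorem pvCastShift (n : Nat) : ((n : Nat) : Int) >>> (1:Nat) = ((n/2 : Nat) : Int) := by
  rw [← Int.natCast_shiftRight, Nat.shiftRight_one]

-- B's port equals its Nat mirror on nonnegative masks
theorem pvAltEqG (m : Nat) : ∀ src : Int, unshift_rawdata_alt src ((m : Nat) : Int) = ((pvG src m : Nat) : Int) := by
  induction m using Nat.strong_induction_on with
  | _ m IH =>
    intro src
    rw [unshift_rawdata_alt, pvG]
    cases m with
    | zero => norm_num
    | succ n =>
      rw [dif_neg (by omega : ¬ ((n+1 : Nat) : Int) ≤ 0), if_neg (by omega : ¬ n + 1 = 0)]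
      rw [pvCastShift, IH ((n+1)/2) (by omega)]
      have hm1 : PySem.Int.band ((n+1 : Nat) : Int) 1 = (((n+1) &&& 1 : Nat) : Int) := by
        rw [show ((1:Int) = ((1:Nat) : Int)) from rfl, PySem.Int.band_natCast]
      rw [hm1, Nat.and_one_is_mod]
      by_cases hodd : (n+1) % 2 = 1
      · rw [if_pos (by simp [hodd]), if_pos hodd]
        rcases pvBandOne01 src with h | h
        · simp [h, ← Int.natCast_shiftLeft]
        · simp only [h, ← Int.natCast_shiftLeft, Int.toNat_one]
          rw [show (1:Int) = ((1:Nat) : Int) from rfl, PySem.Int.bor_natCast]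
      · rw [if_neg (by simp [Nat.mod_two_ne_one.mp hodd]), if_neg hodd]

-- bit-or/shift bookkeeping for the invariant
theorem pvOrShift (o g b ob : Nat) :
    o ||| (((g <<< 1) ||| b) <<< ob) = (o ||| (b <<< ob)) ||| (g <<< (ob+1)) := by
  apply Nat.eq_of_testBit_eq
  intro k
  simp only [Nat.testBit_or, Nat.testBit_shiftLeft]
  by_cases h : ob ≤ k
  · have h' : k - ob - 1 = k - (ob + 1) := by omega
    by_cases h2 : ob + 1 ≤ k
    · simp [h, h2, h', show 1 ≤ k - ob from by omega, Bool.or_assoc, Bool.or_comm]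
    · simp [h, h2, show ¬ 1 ≤ k - ob from by omega]
  · simp [h, show ¬ ob + 1 ≤ k from by omega]

-- invariant: A's loop computes out ||| (pvG src m << ob)
theorem pvLoopAEqG (m : Nat) : ∀ (src : Int) (o ob : Nat),
    pvLoopA src ((m : Nat) : Int) ((o : Nat) : Int) ob = (((o ||| (pvG src m <<< ob)) : Nat) : Int) := by
  induction m using Nat.strong_induction_on with
  | _ m IH =>
    intro src o ob
    rw [pvLoopA, pvG]
    cases m with
    | zero => norm_num
    | succ n =>
      rw [dif_neg (by omega : ¬ ((n+1 : Nat) : Int) ≤ 0), if_neg (by omega : ¬ n + 1 = 0)]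
      have hm1 : PySem.Int.band ((n+1 : Nat) : Int) 1 = (((n+1) % 2 : Nat) : Int) := by
        rw [show ((1:Int) = ((1:Nat) : Int)) from rfl, PySem.Int.band_natCast, Nat.and_one_is_mod]
      rw [hm1, pvCastShift]
      by_cases hodd : (n+1) % 2 = 1
      · rw [if_pos (by rw [hodd]; norm_num), if_pos hodd]
        have hout : (if PySem.Int.band src 1 ≠ 0 then PySem.Int.bor ((o:Nat):Int) (1 <<< ob) else ((o:Nat):Int))
            = (((o ||| ((PySem.Int.band src 1).toNat <<< ob) : Nat)) : Int) := by
          rcases pvBandOne01 src with h | h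
          · rw [if_neg (by simp [h]), h]
            simp
          · rw [if_pos (by simp [h]), h]
            simp only [PySem.Int.bor_natCast, Int.toNat_one]
        rw [hout, IH ((n+1)/2) (by omega)]
        rw [pvOrShift]
      · rw [if_neg (by rw [Nat.mod_two_ne_one.mp hodd]; norm_num), if_neg hodd]
        exact IH ((n+1)/2) (by omega) (src >>> (1:Nat)) o ob

-- ===== VERDICT (by name: the statement is the Claim_ definition above) =====
theorem unshift_rawdata_spec : Claim_equal_unshift_rawdata := by
  intro src mask _ hpre
  unfold Spec_unshift_rawdata unshift_rawdata
  have hm : mask = ((mask.toNat : Nat) : Int) := by rw [Int.toNat_of_nonneg hpre]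
  rw [hm, pvAltEqG]
  have := pvLoopAEqG mask.toNat src 0 0
  simpa using this
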